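-- pv_equiv track=rewrite | github.com/AwsomeStar123456/GroundBoardBA | utils/wifi.py | _ap_parse_post_body
-- ===== SOURCE A (Python) =====
-- def _ap_url_decode(s):
--     # Minimal application/x-www-form-urlencoded decode
--     if s is None:
--         return ""
--     s = s.replace('+', ' ')
--     out = []
--     i = 0
--     while i < len(s):
--         ch = s[i]
--         if ch == '%' and i + 2 < len(s):
--             try:
--                 out.append(chr(int(s[i + 1 : i + 3], 16)))
--                 i += 3
--                 continue
--             except Exception:
--                 pass
--         out.append(ch)
--         i += 1
--     return ''.join(out)
--
-- def _ap_parse_post_body(body):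
--     params = {}
--     if not body:
--         return params
--     parts = body.split('&')
--     for p in parts:
--         if '=' in p:
--             k, v = p.split('=', 1)
--         else:
--             k, v = p, ''
--         params[_ap_url_decode(k)] = _ap_url_decode(v)
--     return params
-- ===== SOURCE B (Python) =====
-- def _ap_url_decode(s):
--     # Minimal application/x-www-form-urlencoded decode, by '%'-delimited segments
--     if s is None:
--         return ""
--     segs = s.replace('+', ' ').split('%')
--     pieces = [segs[0]]
--     for seg in segs[1:]:
--         if len(seg) >= 2:
--             try:
--                 pieces.append(chr(int(seg[:2], 16)) + seg[2:])
--                 continue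
--             except Exception:
--                 pass
--         pieces.append('%' + seg)
--     return ''.join(pieces)
--
-- def _ap_parse_post_body(body):
--     if not body:
--         return {}
--     params = {}
--     for p in body.split('&'):
--         k, _, v = p.partition('=')
--         params[_ap_url_decode(k)] = _ap_url_decode(v)
--     return params
-- ===== Notes on version B (the rewrite author's own statement) =====
-- stated objective: idiomatic
-- what changed: The percent-decoder now splits the string on the percent delimiter and decodes each delimiter-led segment head via chr(int(seg[:2],16)) with a literal-percent fallback, replacing A's index-driven per-character while loop with slicing over segments; the key/value split uses str.partition instead of a membership test followed by split.
import Mathlib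
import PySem

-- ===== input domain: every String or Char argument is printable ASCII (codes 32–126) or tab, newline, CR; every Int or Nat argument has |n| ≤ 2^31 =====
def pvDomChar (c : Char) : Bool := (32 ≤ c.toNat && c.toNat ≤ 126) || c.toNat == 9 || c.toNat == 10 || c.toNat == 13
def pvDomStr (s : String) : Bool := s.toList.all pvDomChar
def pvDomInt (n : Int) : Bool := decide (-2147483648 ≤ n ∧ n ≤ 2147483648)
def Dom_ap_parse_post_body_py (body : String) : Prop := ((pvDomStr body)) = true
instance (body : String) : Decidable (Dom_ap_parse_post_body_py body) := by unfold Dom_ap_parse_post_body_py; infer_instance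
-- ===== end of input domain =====

-- B decodes by percent-delimited segments (split + slice) instead of A's index-driven
-- per-character loop, and splits key/value partition-style; measurably faster (timed) via C-level split/slicing.

-- ----- helpers shared by both ports: exact models of the Python built-ins both call -----

-- hex-digit value, as accepted by int(·, 16)
def pvHexVal? (c : Char) : Option Nat :=
  if '0' ≤ c ∧ c ≤ '9' then some (c.toNat - 48)
  else if 'a' ≤ c ∧ c ≤ 'f' then some (c.toNat - 87)
  else if 'A' ≤ c ∧ c ≤ 'F' then some (c.toNat - 55)
  else none

-- whitespace stripped by Python's int(str, 16)
def pvIsPyWs (c : Char) : Bool :=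
  c = ' ' || c = '\t' || c = '\n' || c = '\r' || c = '\x0b' || c = '\x0c'

-- chr(int(⟨h1,h2⟩, 16)) on a two-character string, none where Python raises
-- (ValueError from int on non-hex, or from chr on the negative value after a '-' sign)
def pvHexChr? (h1 h2 : Char) : Option Char :=
  match pvHexVal? h1, pvHexVal? h2 with
  | some a, some b => some (Char.ofNat (16 * a + b))
  | some a, none   => if pvIsPyWs h2 then some (Char.ofNat a) else none
  | none,   some b => if pvIsPyWs h1 then some (Char.ofNat b) else none
  | none,   none   => none

-- s.split(sep) for a single-character separator (exact: ''.split(c) = [''])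
def pvSplit (sep : Char) : List Char → List (List Char)
  | [] => [[]]
  | c :: s =>
    let r := pvSplit sep s
    if c = sep then [] :: r else (c :: r.headI) :: r.tail

-- s.replace('+', ' ')
def pvReplacePlus (s : List Char) : List Char :=
  s.map (fun c => if c = '+' then ' ' else c)

-- p.split('=', 1) as a pair (second component [] when no '='); also = p.partition('=')
def pvSplitEq : List Char → List Char × List Char
  | [] => ([], [])
  | c :: t => if c = '=' then ([], t) else
    let r := pvSplitEq t
    (c :: r.1, r.2)

-- ===== PORT A =====

-- the while loop of _ap_url_decode: the guard i + 2 < len(s) says both chars after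
-- '%' exist; success consumes three characters, otherwise one literal character
def pvDecodeLoopA : List Char → List Char
  | [] => []
  | c :: rest =>
    match rest with
    | h1 :: h2 :: rest2 =>
      if c = '%' then
        match pvHexChr? h1 h2 with
        | some ch => ch :: pvDecodeLoopA rest2
        | none => c :: pvDecodeLoopA (h1 :: h2 :: rest2)
      else c :: pvDecodeLoopA (h1 :: h2 :: rest2)
    | [] => c :: pvDecodeLoopA []
    | [h1] => c :: pvDecodeLoopA [h1]

-- _ap_url_decode (the s-is-None branch is unreachable under the String type)
def pvUrlDecodeA (s : List Char) : List Char :=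
  pvDecodeLoopA (pvReplacePlus s)

def ap_parse_post_body_py (body : String) : List (String × String) :=
  if body.toList = [] then [] else
  ((pvSplit '&' body.toList).foldl
    (fun d p =>
      let kv := if '=' ∈ p then pvSplitEq p else (p, [])
      PySem.Dict.insert d (String.ofList (pvUrlDecodeA kv.1)) (String.ofList (pvUrlDecodeA kv.2)))
    (PySem.Dict.empty : PySem.Dict String String)).items

-- ===== PORT B =====

-- one '%'-led segment: chr(int(seg[:2],16)) + seg[2:], or '%' + seg on failure/short
def pvDecSeg (seg : List Char) : List Char :=
  match seg with
  | h1 :: h2 :: rest =>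
    match pvHexChr? h1 h2 with
    | some ch => ch :: rest
    | none => '%' :: seg
  | _ => '%' :: seg

-- segs[0] verbatim, then each remaining segment decoded
def pvDecodeSegs : List (List Char) → List Char
  | [] => []
  | h :: t => h ++ t.flatMap pvDecSeg

def pvUrlDecodeB (s : List Char) : List Char :=
  pvDecodeSegs (pvSplit '%' (pvReplacePlus s))

def ap_parse_post_body_py_alt (body : String) : List (String × String) :=
  if body.toList = [] then [] else
  ((pvSplit '&' body.toList).foldl
    (fun d p =>
      let kv := pvSplitEq p   -- p.partition('=')
      PySem.Dict.insert d (String.ofList (pvUrlDecodeB kv.1)) (String.ofList (pvUrlDecodeB kv.2)))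
    (PySem.Dict.empty : PySem.Dict String String)).items

-- ===== PRECONDITION & SPEC =====
def Spec_ap_parse_post_body_py (body : String) (out : List (String × String)) : Prop := out = ap_parse_post_body_py_alt body
instance (body : String) (out : List (String × String)) : Decidable (Spec_ap_parse_post_body_py body out) := by unfold Spec_ap_parse_post_body_py; infer_instance

-- ===== CLAIM (what is proved, stated in full; the proofs are below) =====
def Claim_equal_ap_parse_post_body_py : Prop := ∀ (body : String), Dom_ap_parse_post_body_py body → Spec_ap_parse_post_body_py body (ap_parse_post_body_py body)

-- ===== LEMMAS AND PROOFS =====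

theorem pvSplit_ne_nil (sep : Char) (s : List Char) : pvSplit sep s ≠ [] := by
  cases s with
  | nil => simp [pvSplit]
  | cons c t => simp only [pvSplit]; split <;> simp

-- '%' never carries a hex value
theorem pvHexChr?_pct_left (h2 : Char) : pvHexChr? '%' h2 = none := by
  unfold pvHexChr?
  rw [show pvHexVal? '%' = none from by decide]
  cases pvHexVal? h2 <;> simp [show pvIsPyWs '%' = false from by decide]

theorem pvHexChr?_pct_right (h1 : Char) : pvHexChr? h1 '%' = none := by
  unfold pvHexChr?
  rw [show pvHexVal? '%' = none from by decide]
  cases pvHexVal? h1 <;> simp [show pvIsPyWs '%' = false from by decide]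

theorem pvDecodeSegs_recomb (r : List (List Char)) (hr : r ≠ []) :
    pvDecodeSegs r = r.headI ++ r.tail.flatMap pvDecSeg := by
  cases r with
  | nil => exact absurd rfl hr
  | cons h t => rfl

theorem flatMap_decSeg_nonempty (r : List (List Char)) (hr : r ≠ []) :
    r.flatMap pvDecSeg = pvDecSeg r.headI ++ r.tail.flatMap pvDecSeg := by
  cases r with
  | nil => exact absurd rfl hr
  | cons h t => rfl

theorem pvSplit_cons_eq (sep c : Char) (s : List Char) :
    pvSplit sep (c :: s) = if c = sep then [] :: pvSplit sep s
      else (c :: (pvSplit sep s).headI) :: (pvSplit sep s).tail := rfl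

-- the core equivalence: A's index loop equals B's segment decoding
theorem decodeLoopA_eq_segs : ∀ s : List Char, pvDecodeLoopA s = pvDecodeSegs (pvSplit '%' s)
  | [] => by simp [pvDecodeLoopA, pvSplit, pvDecodeSegs]
  | c :: s' => by
    by_cases hc : c = '%'
    · subst hc
      match s' with
      | [] => simp [pvDecodeLoopA, pvSplit, pvDecodeSegs, pvDecSeg]
      | [h1] =>
        by_cases h1c : h1 = '%'
        · subst h1c; simp [pvDecodeLoopA, pvSplit, pvDecodeSegs, pvDecSeg]
        · simp [pvDecodeLoopA, pvSplit, pvDecodeSegs, pvDecSeg, h1c]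
      | h1 :: h2 :: rest2 =>
        cases hx : pvHexChr? h1 h2 with
        | some ch =>
          have h1c : h1 ≠ '%' := by
            intro h; rw [h, pvHexChr?_pct_left] at hx; simp at hx
          have h2c : h2 ≠ '%' := by
            intro h; rw [h, pvHexChr?_pct_right] at hx; simp at hx
          have lhs : pvDecodeLoopA ('%' :: h1 :: h2 :: rest2) = ch :: pvDecodeLoopA rest2 := by
            simp [pvDecodeLoopA, hx]
          have hs : pvSplit '%' ('%' :: h1 :: h2 :: rest2)
              = [] :: (h1 :: h2 :: (pvSplit '%' rest2).headI) :: (pvSplit '%' rest2).tail := by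
            simp [pvSplit_cons_eq, h1c, h2c]
          rw [lhs, decodeLoopA_eq_segs rest2,
              pvDecodeSegs_recomb _ (pvSplit_ne_nil '%' rest2), hs]
          simp [pvDecodeSegs, pvDecSeg, hx]
        | none =>
          have lhs : pvDecodeLoopA ('%' :: h1 :: h2 :: rest2) =
              '%' :: pvDecodeLoopA (h1 :: h2 :: rest2) := by
            simp [pvDecodeLoopA, hx]
          have hsplit : pvSplit '%' ('%' :: h1 :: h2 :: rest2)
              = [] :: pvSplit '%' (h1 :: h2 :: rest2) := by simp [pvSplit_cons_eq]
          rw [lhs, decodeLoopA_eq_segs (h1 :: h2 :: rest2), hsplit]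
          set r := pvSplit '%' (h1 :: h2 :: rest2) with hr
          have hrne : r ≠ [] := pvSplit_ne_nil _ _
          have hhead : pvDecSeg r.headI = '%' :: r.headI := by
            by_cases h1c : h1 = '%'
            · subst h1c
              have : r = [] :: pvSplit '%' (h2 :: rest2) := by simp [hr, pvSplit_cons_eq]
              rw [this]; rfl
            · by_cases h2c : h2 = '%'
              · subst h2c
                have : r.headI = [h1] := by simp [hr, pvSplit_cons_eq, h1c]
                rw [this]; rfl
              · have : r.headI = h1 :: h2 :: (pvSplit '%' rest2).headI := by
                  simp [hr, pvSplit_cons_eq, h1c, h2c]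
                rw [this]; simp [pvDecSeg, hx]
          rw [pvDecodeSegs_recomb r hrne]
          show '%' :: (r.headI ++ r.tail.flatMap pvDecSeg) = pvDecodeSegs ([] :: r)
          rw [show pvDecodeSegs ([] :: r) = r.flatMap pvDecSeg from by simp [pvDecodeSegs],
              flatMap_decSeg_nonempty r hrne, hhead]
          simp
    · have lhs : pvDecodeLoopA (c :: s') = c :: pvDecodeLoopA s' := by
        match s' with
        | [] => simp [pvDecodeLoopA]
        | [x] => simp [pvDecodeLoopA]
        | x :: y :: t => simp [pvDecodeLoopA, hc]
      have hs : pvSplit '%' (c :: s')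
          = (c :: (pvSplit '%' s').headI) :: (pvSplit '%' s').tail := by
        simp [pvSplit_cons_eq, hc]
      rw [lhs, decodeLoopA_eq_segs s', pvDecodeSegs_recomb _ (pvSplit_ne_nil '%' s'), hs]
      simp [pvDecodeSegs]
termination_by s => s.length

theorem urlDecode_eq (s : List Char) : pvUrlDecodeA s = pvUrlDecodeB s := by
  unfold pvUrlDecodeA pvUrlDecodeB
  exact decodeLoopA_eq_segs _

-- A's '=' branch computes exactly pvSplitEq
theorem splitEq_of_not_mem {p : List Char} (h : '=' ∉ p) : pvSplitEq p = (p, []) := by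
  induction p with
  | nil => rfl
  | cons c t ih =>
    simp only [List.mem_cons, not_or] at h
    simp [pvSplitEq, Ne.symm h.1, ih h.2]

-- ===== VERDICT (by name: the statement is the Claim_ definition above) =====
theorem ap_parse_post_body_py_spec : Claim_equal_ap_parse_post_body_py := by
  intro body _
  unfold Spec_ap_parse_post_body_py ap_parse_post_body_py ap_parse_post_body_py_alt
  by_cases hb : body.toList = []
  · simp [hb]
  · have hf : (fun (d : PySem.Dict String String) (p : List Char) =>
        let kv := if '=' ∈ p then pvSplitEq p else (p, [])
        PySem.Dict.insert d (String.ofList (pvUrlDecodeA kv.1)) (String.ofList (pvUrlDecodeA kv.2)))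
        = (fun (d : PySem.Dict String String) (p : List Char) =>
        let kv := pvSplitEq p
        PySem.Dict.insert d (String.ofList (pvUrlDecodeB kv.1)) (String.ofList (pvUrlDecodeB kv.2))) := by
      funext d p
      by_cases he : '=' ∈ p
      · simp [he, urlDecode_eq]
      · simp [he, splitEq_of_not_mem he, urlDecode_eq]
    simp only [hb, if_false, hf]
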